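-- pv_equiv track=rewrite | github.com/epsilon912/check_max_proffit | vanila_solver.py | get_last_max
-- ===== SOURCE A (Python) =====
-- def get_last_max(data):
--     max_val = float('-inf')
--     pos = None
--     for n, el in enumerate(data):
--         if max_val <= el:
--             pos = n
--             max_val = el
--     return max_val, pos
-- ===== SOURCE B (Python) =====
-- def get_last_max(data):
--     # two passes: builtin max, then last position via reversed-list index
--     max_val = max(data)
--     pos = len(data) - 1 - data[::-1].index(max_val)
--     return max_val, pos
-- ===== Notes on version B (the rewrite author's own statement) =====
-- stated objective: idiomatic
-- what changed: Replaces the fused running-max/position loop with two standard-library passes: builtin max() for the value, then data[::-1].index(max_val) converted to the last index of the maximum.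
-- outside the precondition, e.g. on get_last_max([]): A returns (-inf, None), B raises ValueError
import Mathlib
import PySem

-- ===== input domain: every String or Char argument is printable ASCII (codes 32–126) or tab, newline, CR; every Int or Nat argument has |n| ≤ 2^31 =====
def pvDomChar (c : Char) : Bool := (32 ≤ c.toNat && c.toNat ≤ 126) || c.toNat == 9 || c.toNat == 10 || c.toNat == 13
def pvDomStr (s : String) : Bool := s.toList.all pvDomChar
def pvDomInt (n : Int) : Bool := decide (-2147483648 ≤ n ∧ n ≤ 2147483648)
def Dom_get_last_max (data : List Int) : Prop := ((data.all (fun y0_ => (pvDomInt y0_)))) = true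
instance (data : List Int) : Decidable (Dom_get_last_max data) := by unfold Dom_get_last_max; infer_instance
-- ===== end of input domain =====

-- B replaces A's fused running-max loop with two standard-library passes (max, then
-- reverse index); same O(n) cost, more idiomatic.

-- ===== PORT A =====
-- max_val starts as float('-inf'): modelled as `none`, and `none <= el` is always true.
def pvNegInfLe (mv : Option Int) (el : Int) : Bool :=
  match mv with | none => true | some m => decide (m ≤ el)

def goA : List Int → Nat → Option Int → Option Int → Option Int × Option Int
  | [], _, mv, pos => (mv, pos)
  | el :: rest, n, mv, pos =>
    if pvNegInfLe mv el then goA rest (n + 1) (some el) (some (n : Int))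
    else goA rest (n + 1) mv pos

def get_last_max (data : List Int) : Int × Option Int :=
  let s := goA data 0 none none
  (s.1.getD 0, s.2)
  -- s.1 = none only for data = [], where Python A returns float('-inf') (not an Int): outside Pre_

-- ===== PORT B =====
def get_last_max_alt (data : List Int) : Int × Option Int :=
  match PySem.List.max? data (fun y => y) with
  | none => (0, none)        -- Python B: max([]) raises ValueError; outside Pre_
  | some m =>
    -- data[::-1] = data.reverse (PySem.List.slice?_none_none_neg_one)
    match PySem.List.index? data.reverse m with
    | some i => (m, some ((data.length : Int) - 1 - (i : Int)))
    | none => (m, none)      -- unreachable: m ∈ data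

-- ===== PRECONDITION & SPEC =====
-- Pre_ excludes only the empty list, on which A returns float('-inf') (not an Int value) and B raises ValueError.
def Pre_get_last_max (data : List Int) : Prop := data ≠ []
instance (data : List Int) : Decidable (Pre_get_last_max data) := by unfold Pre_get_last_max; infer_instance

def pvWitness_get_last_max : List Int := [1, 3, 2, 3]

def Spec_get_last_max (data : List Int) (out : Int × Option Int) : Prop := out = get_last_max_alt data
instance (data : List Int) (out : Int × Option Int) : Decidable (Spec_get_last_max data out) := by unfold Spec_get_last_max; infer_instance

-- ===== CLAIM (what is proved, stated in full; the proofs are below) =====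
def Claim_equal_get_last_max : Prop := ∀ (data : List Int), Dom_get_last_max data → Pre_get_last_max data → Spec_get_last_max data (get_last_max data)

-- ===== LEMMAS AND PROOFS =====

-- unfolding the A-loop at the right end
lemma goA_concat (data : List Int) (x : Int) : ∀ (n : Nat) (mv pos : Option Int),
    goA (data ++ [x]) n mv pos =
      (if pvNegInfLe (goA data n mv pos).1 x
       then (some x, some ((n + data.length : Nat) : Int))
       else goA data n mv pos) := by
  induction data with
  | nil => intro n mv pos; simp [goA]
  | cons a t ih =>
    intro n mv pos
    have hidx : (n + 1) + t.length = n + (a :: t).length := by simp; omega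
    simp only [List.cons_append, goA]
    cases h : pvNegInfLe mv a
    · simp only [Bool.false_eq_true, if_false]
      rw [ih, hidx]
    · simp only [if_true]
      rw [ih, hidx]

-- A's loop state is fully defined (some/some) on nonempty input
lemma goA_isSome (data : List Int) (h : data ≠ []) :
    (goA data 0 none none).1.isSome ∧ (goA data 0 none none).2.isSome := by
  induction data using List.reverseRecOn with
  | nil => exact absurd rfl h
  | append_singleton t x ih =>
    rw [goA_concat]
    by_cases ht : t = []
    · subst ht; simp [goA, pvNegInfLe]
    · rcases ih ht with ⟨h1, h2⟩
      split_ifs <;> simp_all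

-- A-side concat step expressed on the wrapped result
lemma A_concat (data : List Int) (x : Int) (h : data ≠ []) :
    get_last_max (data ++ [x]) =
      (if (get_last_max data).1 ≤ x then (x, some (data.length : Int))
       else get_last_max data) := by
  rcases goA_isSome data h with ⟨h1, h2⟩
  rcases Option.isSome_iff_exists.mp h1 with ⟨m, hm⟩
  rcases Option.isSome_iff_exists.mp h2 with ⟨p, hp⟩
  simp only [get_last_max, goA_concat, hm, hp, pvNegInfLe]
  split_ifs with hc <;> simp_all <;> omega

-- B-side: the maximum of data ++ [x]
lemma max?_concat (t : List Int) (x m : Int)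
    (hm : PySem.List.max? t (fun y => y) = some m) :
    PySem.List.max? (t ++ [x]) (fun y => y) = some (max m x) := by
  rcases t with _ | ⟨a, r⟩
  · simp [PySem.List.max?] at hm
  · rw [PySem.List.max?_id_cons] at hm
    rw [List.cons_append, PySem.List.max?_id_cons]
    simp only [List.foldl_append, List.foldl]
    simp only [Option.some.injEq] at hm
    rw [hm]

-- B-side concat step
lemma B_concat (data : List Int) (x : Int) (h : data ≠ []) :
    get_last_max_alt (data ++ [x]) =
      (if (get_last_max_alt data).1 ≤ x then (x, some (data.length : Int))
       else get_last_max_alt data) := by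
  obtain ⟨m, hm⟩ : ∃ m, PySem.List.max? data (fun y => y) = some m := by
    rcases t : PySem.List.max? data (fun y => y) with _ | m
    · exact absurd ((PySem.List.max?_eq_none_iff _ _).mp t) h
    · exact ⟨m, rfl⟩
  have hmem : m ∈ data := PySem.List.max?_mem hm
  obtain ⟨i, hi⟩ : ∃ i, PySem.List.index? data.reverse m = some i := by
    rcases t : PySem.List.index? data.reverse m with _ | i
    · rw [PySem.List.index?_eq_none_iff _ _] at t
      exact absurd (List.mem_reverse.mpr hmem) t
    · exact ⟨i, rfl⟩
  have hrev : (data ++ [x]).reverse = x :: data.reverse := by simp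
  by_cases hc : m ≤ x
  · have hmax : max m x = x := max_eq_right hc
    simp only [get_last_max_alt, max?_concat data x m hm, hmax, hrev,
      PySem.List.index?_cons_self, hm, hi]
    simp [hc]
  · have hmax : max m x = m := max_eq_left (le_of_lt (lt_of_not_ge hc))
    have hne : x ≠ m := by omega
    simp only [get_last_max_alt, max?_concat data x m hm, hmax, hrev,
      PySem.List.index?_cons_of_ne data.reverse hne, hi, hm]
    simp [hc]; omega

lemma AB_eq (data : List Int) (h : data ≠ []) :
    get_last_max data = get_last_max_alt data := by
  induction data using List.reverseRecOn with
  | nil => exact absurd rfl h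
  | append_singleton t x ih =>
    by_cases ht : t = []
    · subst ht
      simp [get_last_max, get_last_max_alt, goA, pvNegInfLe, PySem.List.max?_id_cons]
    · rw [A_concat t x ht, B_concat t x ht, ih ht]

-- ===== VERDICT (by name: the statement is the Claim_ definition above) =====
theorem get_last_max_spec : Claim_equal_get_last_max := by
  intro data _ hpre
  exact AB_eq data hpre
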